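-- pv_equiv track=rewrite | github.com/yukikongju/LeetCodeTraining | CP_Halim/coci/2006-2007/contest5/trik.py | solve
-- ===== SOURCE A (Python) =====
-- def solve(s):
--     pos = 1
--     for move in s:
--         if move == 'A':
--             if pos == 1:
--                 pos = 2
--             elif pos == 2:
--                 pos = 1
--         elif move == 'B':
--             if pos == 2:
--                 pos = 3
--             elif pos == 3:
--                 pos = 2
--         elif move == 'C':
--             if pos == 1:
--                 pos = 3
--             elif pos == 3:
--                 pos = 1
--     return pos
-- ===== SOURCE B (Python) =====
-- def solve(s):
--     # Divide and conquer: compute the whole permutation of the three cups effected by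
--     # a segment of moves, combining halves by permutation composition; the answer is
--     # the image of slot 0 under the full permutation, plus 1.
--     base = {'A': (1, 0, 2), 'B': (0, 2, 1), 'C': (2, 1, 0)}
--
--     def perm_of(lo, hi):
--         if hi - lo == 0:
--             return (0, 1, 2)
--         if hi - lo == 1:
--             return base.get(s[lo], (0, 1, 2))
--         mid = (lo + hi) // 2
--         p = perm_of(lo, mid)
--         q = perm_of(mid, hi)
--         return (q[p[0]], q[p[1]], q[p[2]])
--
--     return perm_of(0, len(s))[0] + 1
-- ===== Notes on version B (the rewrite author's own statement) =====
-- stated objective: alternative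
-- what changed: B replaces A's single left-to-right scan that branches on the current scalar position with a divide-and-conquer that computes the full 3-cup permutation of each half of the move string and combines them by permutation composition, finally applying the product permutation to slot 0.
import Mathlib
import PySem

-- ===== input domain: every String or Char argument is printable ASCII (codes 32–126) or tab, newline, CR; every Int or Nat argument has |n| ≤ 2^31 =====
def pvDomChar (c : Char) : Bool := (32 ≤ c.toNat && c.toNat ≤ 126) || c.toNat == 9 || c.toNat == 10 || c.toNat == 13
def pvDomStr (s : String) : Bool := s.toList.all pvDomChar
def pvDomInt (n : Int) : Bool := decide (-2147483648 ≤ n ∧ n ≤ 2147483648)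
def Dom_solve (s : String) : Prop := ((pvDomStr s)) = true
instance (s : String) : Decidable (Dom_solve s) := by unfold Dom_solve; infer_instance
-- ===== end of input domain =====

-- B computes the segment's cup permutation by divide and conquer (compose halves), then
-- applies it to the start slot; A scans left to right branching on the scalar position.
-- Objective: alternative (same O(n) cost, different algorithm).

-- ===== PORT A =====
-- one iteration of A's loop: branch on the move, then on the current position
def solveStep (pos : Int) (move : Char) : Int :=
  if move = 'A' then
    (if pos = 1 then 2 else if pos = 2 then 1 else pos)
  else if move = 'B' then
    (if pos = 2 then 3 else if pos = 3 then 2 else pos)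
  else if move = 'C' then
    (if pos = 1 then 3 else if pos = 3 then 1 else pos)
  else pos

def solve (s : String) : Int := s.toList.foldl solveStep 1

-- ===== PORT B =====
-- base.get(c, (0,1,2)): permutation of one move
def charPerm (c : Char) : Int × Int × Int :=
  if c = 'A' then (1, 0, 2)
  else if c = 'B' then (0, 2, 1)
  else if c = 'C' then (2, 1, 0)
  else (0, 1, 2)

-- tuple indexing p[i] for i ∈ {0,1,2}
def pget (p : Int × Int × Int) (i : Int) : Int :=
  if i = 0 then p.1 else if i = 1 then p.2.1 else p.2.2

-- perm_of(lo, hi) on the slice l = s[lo:hi]: split at the middle, compose halves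
def permOf (l : List Char) : Int × Int × Int :=
  match h : l with
  | [] => (0, 1, 2)
  | [c] => charPerm c
  | _ :: _ :: _ =>
    let p := permOf (l.take (l.length / 2))
    let q := permOf (l.drop (l.length / 2))
    (pget q p.1, pget q p.2.1, pget q p.2.2)
termination_by l.length
decreasing_by
  · simp_all [List.length_take]; omega
  · simp_all [List.length_drop]; omega

def solve_alt (s : String) : Int := pget (permOf s.toList) 0 + 1

-- ===== PRECONDITION & SPEC =====
def Spec_solve (s : String) (out : Int) : Prop := out = solve_alt s
instance (s : String) (out : Int) : Decidable (Spec_solve s out) := by unfold Spec_solve; infer_instance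

-- ===== CLAIM (what is proved, stated in full; the proofs are below) =====
def Claim_equal_solve : Prop := ∀ (s : String), Dom_solve s → Spec_solve s (solve s)

-- ===== LEMMAS AND PROOFS =====

-- 0-based version of one step of A
def idxStep (i : Int) (c : Char) : Int := pget (charPerm c) i

lemma idxStep_mem (i : Int) (c : Char) (h : i = 0 ∨ i = 1 ∨ i = 2) :
    idxStep i c = 0 ∨ idxStep i c = 1 ∨ idxStep i c = 2 := by
  by_cases hA : c = 'A' <;> by_cases hB : c = 'B' <;> by_cases hC : c = 'C' <;>
    rcases h with h | h | h <;> subst h <;> simp [idxStep, charPerm, pget, hA, hB, hC]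

lemma foldl_idxStep_mem (l : List Char) (i : Int) (h : i = 0 ∨ i = 1 ∨ i = 2) :
    l.foldl idxStep i = 0 ∨ l.foldl idxStep i = 1 ∨ l.foldl idxStep i = 2 := by
  induction l generalizing i with
  | nil => exact h
  | cons c t ih => exact ih _ (idxStep_mem i c h)

lemma pget_comp (p q : Int × Int × Int) (i : Int) (h : i = 0 ∨ i = 1 ∨ i = 2) :
    pget (pget q p.1, pget q p.2.1, pget q p.2.2) i = pget q (pget p i) := by
  rcases h with h | h | h <;> subst h <;> simp [pget]

lemma permOf_apply (n : ℕ) (l : List Char) (hl : l.length = n) (i : Int)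
    (h : i = 0 ∨ i = 1 ∨ i = 2) : pget (permOf l) i = l.foldl idxStep i := by
  induction n using Nat.strong_induction_on generalizing l i with
  | _ n ih =>
    match l with
    | [] => rcases h with h | h | h <;> subst h <;> simp [permOf, pget]
    | [c] => simp [permOf, idxStep]
    | a :: b :: t =>
      rw [permOf]
      set l : List Char := a :: b :: t with hldef
      have hlen : 2 ≤ l.length := by simp [hldef]
      have ht : (l.take (l.length / 2)).length < n := by
        rw [← hl]; simp [List.length_take]; omega
      have hd : (l.drop (l.length / 2)).length < n := by
        rw [← hl]; simp [List.length_drop]; omega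
      rw [pget_comp _ _ i h,
        ih _ ht (l.take (l.length / 2)) rfl i h,
        ih _ hd (l.drop (l.length / 2)) rfl _ (foldl_idxStep_mem _ i h),
        ← List.foldl_append, List.take_append_drop]

lemma solveStep_succ (i : Int) (c : Char) (h : i = 0 ∨ i = 1 ∨ i = 2) :
    solveStep (i + 1) c = idxStep i c + 1 := by
  by_cases hA : c = 'A' <;> by_cases hB : c = 'B' <;> by_cases hC : c = 'C' <;>
    rcases h with h | h | h <;> subst h <;> simp [solveStep, idxStep, charPerm, pget, hA, hB, hC]

lemma foldl_succ (l : List Char) (i : Int) (h : i = 0 ∨ i = 1 ∨ i = 2) :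
    l.foldl solveStep (i + 1) = l.foldl idxStep i + 1 := by
  induction l generalizing i with
  | nil => rfl
  | cons c t ih =>
    simp only [List.foldl_cons, solveStep_succ i c h]
    exact ih _ (idxStep_mem i c h)

-- ===== VERDICT (by name: the statement is the Claim_ definition above) =====
theorem solve_spec : Claim_equal_solve := by
  intro s _
  show solve s = solve_alt s
  unfold solve solve_alt
  rw [permOf_apply s.toList.length s.toList rfl 0 (Or.inl rfl)]
  exact foldl_succ s.toList 0 (Or.inl rfl)
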